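-- pv_equiv track=rewrite | github.com/mfgnik/6_password_strength | password_strength.py | count_symbols
-- ===== SOURCE A (Python) =====
-- def count_symbols(password):
--     amount_of_symbols = 0
--     first_group_of_symbols = set(chr(index) for index in range(33, 48))
--     second_group_of_symbols = set(chr(index) for index in range(58, 65))
--     symbols = first_group_of_symbols | second_group_of_symbols
--     for letter in password:
--         if letter in symbols:
--             amount_of_symbols += 1
--     return amount_of_symbols
-- ===== SOURCE B (Python) =====
-- def count_symbols(password):
--     counts = {}
--     for letter in password:
--         counts[letter] = counts.get(letter, 0) + 1
--     symbols = [chr(index) for index in range(33, 48)] + [chr(index) for index in range(58, 65)]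
--     return sum(counts.get(ch, 0) for ch in symbols)
-- ===== Notes on version B (the rewrite author's own statement) =====
-- stated objective: alternative
-- what changed: B builds a frequency table of the password in one pass and then sums the tallies of the 22 fixed symbols, instead of scanning the password and testing set membership per character.
import Mathlib
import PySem

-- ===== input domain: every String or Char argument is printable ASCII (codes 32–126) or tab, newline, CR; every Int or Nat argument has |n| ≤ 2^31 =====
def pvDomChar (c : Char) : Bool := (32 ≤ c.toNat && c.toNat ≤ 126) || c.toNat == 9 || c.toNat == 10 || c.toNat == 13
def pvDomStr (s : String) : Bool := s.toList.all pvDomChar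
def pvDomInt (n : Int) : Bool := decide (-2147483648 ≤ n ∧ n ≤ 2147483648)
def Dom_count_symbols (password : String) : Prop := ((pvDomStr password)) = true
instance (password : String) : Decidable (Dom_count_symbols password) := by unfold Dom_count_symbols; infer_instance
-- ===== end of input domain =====

-- B replaces A's per-character membership test with a frequency table summed over the fixed symbol list (alternative decomposition).

-- ===== PORT A =====
-- chr(index) on 33..64 ported as Char.ofNat index.toNat (exact: indices are in 0..0x10FFFF)
def count_symbols (password : String) : Int :=
  let first_group_of_symbols : PySem.Set Char :=
    PySem.Set.ofList ((PySem.List.pyRange 33 48 1).map (fun index => Char.ofNat index.toNat))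
  let second_group_of_symbols : PySem.Set Char :=
    PySem.Set.ofList ((PySem.List.pyRange 58 65 1).map (fun index => Char.ofNat index.toNat))
  let symbols := PySem.Set.union first_group_of_symbols second_group_of_symbols
  password.toList.foldl
    (fun amount_of_symbols letter =>
      if PySem.Set.contains symbols letter then amount_of_symbols + 1 else amount_of_symbols) 0

-- ===== PORT B =====
def count_symbols_alt (password : String) : Int :=
  let counts : PySem.Dict Char Int :=
    password.toList.foldl (fun counts letter => counts.insert letter (counts.getD letter 0 + 1))
      PySem.Dict.empty
  let symbols : List Char :=
    (PySem.List.pyRange 33 48 1).map (fun index => Char.ofNat index.toNat) ++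
    (PySem.List.pyRange 58 65 1).map (fun index => Char.ofNat index.toNat)
  (symbols.map (fun ch => counts.getD ch 0)).sum

-- ===== PRECONDITION & SPEC =====
def Spec_count_symbols (password : String) (out : Int) : Prop := out = count_symbols_alt password
instance (password : String) (out : Int) : Decidable (Spec_count_symbols password out) := by unfold Spec_count_symbols; infer_instance

-- ===== CLAIM (what is proved, stated in full; the proofs are below) =====
def Claim_equal_count_symbols : Prop := ∀ (password : String), Dom_count_symbols password → Spec_count_symbols password (count_symbols password)

-- ===== LEMMAS AND PROOFS =====

-- the concrete symbol list both programs use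
def pvSyms : List Char :=
  (PySem.List.pyRange 33 48 1).map (fun index => Char.ofNat index.toNat) ++
  (PySem.List.pyRange 58 65 1).map (fun index => Char.ofNat index.toNat)

lemma pvA_foldl (l : List Char) (S : PySem.Set Char) (acc : Int) :
    l.foldl (fun a c => if PySem.Set.contains S c then a + 1 else a) acc
      = acc + (l.countP (fun c => PySem.Set.contains S c) : Int) := by
  induction l generalizing acc with
  | nil => simp
  | cons x xs ih =>
    simp only [List.foldl_cons, List.countP_cons, ih]
    split_ifs
    · simp
      ring
    · simp

lemma pvInd (x : Char) (syms : List Char) (h : syms.Nodup) :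
    (syms.map (fun s => if s = x then (1 : Int) else 0)).sum = if x ∈ syms then 1 else 0 := by
  induction syms with
  | nil => simp
  | cons y ys ih =>
    rcases List.nodup_cons.mp h with ⟨hy, hys⟩
    simp only [List.map_cons, List.sum_cons, ih hys, List.mem_cons]
    by_cases hxy : y = x
    · subst hxy
      simp [hy]
    · have hne : ¬ x = y := fun he => hxy he.symm
      simp [hxy, hne]

lemma pvB_sum (syms l : List Char) (h : syms.Nodup) :
    (syms.map (fun s => (l.count s : Int))).sum
      = (l.countP (fun c => decide (c ∈ syms)) : Int) := by
  induction l with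
  | nil => simp
  | cons x xs ih =>
    have hcount : ∀ s : Char, (x :: xs).count s = xs.count s + if s = x then 1 else 0 := by
      intro s
      by_cases hs : s = x
      · subst hs; simp
      · have hne : ¬ x = s := fun he => hs he.symm
        simp [hs, hne]
    have hmap : syms.map (fun s => ((x :: xs).count s : Int))
        = syms.map (fun s => (xs.count s : Int) + if s = x then 1 else 0) :=
      List.map_congr_left (fun s _ => by rw [hcount s]; split_ifs <;> push_cast <;> ring)
    have hsplit : (syms.map (fun s => ((x :: xs).count s : Int))).sum
        = (syms.map (fun s => (xs.count s : Int))).sum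
          + (syms.map (fun s => if s = x then (1 : Int) else 0)).sum := by
      rw [hmap, ← List.sum_map_add]
    rw [hsplit, ih, pvInd x syms h, List.countP_cons]
    by_cases hx : x ∈ syms
    · simp [hx]
    · simp [hx]

-- ===== VERDICT (by name: the statement is the Claim_ definition above) =====
theorem count_symbols_spec : Claim_equal_count_symbols := by
  intro password _
  show count_symbols password = count_symbols_alt password
  have hnodup : pvSyms.Nodup := by decide
  have hS : PySem.Set.union
      (PySem.Set.ofList ((PySem.List.pyRange 33 48 1).map (fun index => Char.ofNat index.toNat)))
      (PySem.Set.ofList ((PySem.List.pyRange 58 65 1).map (fun index => Char.ofNat index.toNat)))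
      = pvSyms := by decide
  simp only [count_symbols, count_symbols_alt, hS,
    PySem.Dict.foldl_insert_getD_add_one_eq_counter]
  rw [pvA_foldl]
  simp only [PySem.Dict.getD_counter]
  rw [← pvSyms.eq_def, pvB_sum pvSyms password.toList hnodup]
  rw [zero_add]
  congr 1
  apply List.countP_congr
  intro c _
  simp
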